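-- pv_equiv track=rewrite | github.com/VSmirno/agi | src/snks/agent/perception.py | outcome_to_verify
-- ===== SOURCE A (Python) =====
-- def outcome_to_verify(
--     action: str, inv_before: dict[str, int], inv_after: dict[str, int],
-- ) -> str | None:
--     survival = {"health", "food", "drink", "energy"}
--     gains, losses = {}, {}
--     for k in set(inv_before) | set(inv_after):
--         d = inv_after.get(k, 0) - inv_before.get(k, 0)
--         if d > 0:
--             gains[k] = d
--         elif d < 0:
--             losses[k] = -d
--     if action == "do":
--         for k in gains:
--             if k not in survival:
--                 return k
--         for stat in ("food", "drink"):
--             if gains.get(stat, 0) > 0: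
--                 return f"restore_{stat}"
--         return None
--     if action.startswith("place_"):
--         return action.replace("place_", "") if losses else None
--     if action.startswith("make_"):
--         crafted = action.replace("make_", "")
--         return crafted if gains.get(crafted, 0) > 0 else None
--     return None
-- ===== SOURCE B (Python) =====
-- def outcome_to_verify(
--     action: str, inv_before: dict[str, int], inv_after: dict[str, int],
-- ) -> str | None:
--     # One signed delta map built by subtract-merge (copy after, subtract before),
--     # instead of classifying a set union into gains/losses dicts.
--     delta = dict(inv_after)
--     for k, v in inv_before.items():
--         delta[k] = delta.get(k, 0) - v
--
--     if action == "do":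
--         gained = min((k for k, d in delta.items()
--                       if d > 0 and k not in ("health", "food", "drink", "energy")),
--                      default=None)
--         if gained is not None:
--             return gained
--         for stat in ("food", "drink"):
--             if delta.get(stat, 0) > 0:
--                 return f"restore_{stat}"
--         return None
--     if action.startswith("place_"):
--         return action.replace("place_", "") if any(d < 0 for d in delta.values()) else None
--     if action.startswith("make_"):
--         crafted = action.replace("make_", "")
--         return crafted if delta.get(crafted, 0) > 0 else None
--     return None
-- ===== Notes on version B (the rewrite author's own statement) =====
-- stated objective: alternative
-- what changed: B builds one signed delta map by copying inv_after and subtracting inv_before (instead of classifying a set union into separate gains/losses dicts), dispatches on the action, and in the 'do' branch selects the lexicographically smallest gained non-survival key with min(..., default=None) instead of returning the first hit of a scan; …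
-- outside the precondition, e.g. on outcome_to_verify('do', {}, {'stone': 1, 'coal': 1}): A returns 'stone', B returns 'coal'
import Mathlib
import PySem

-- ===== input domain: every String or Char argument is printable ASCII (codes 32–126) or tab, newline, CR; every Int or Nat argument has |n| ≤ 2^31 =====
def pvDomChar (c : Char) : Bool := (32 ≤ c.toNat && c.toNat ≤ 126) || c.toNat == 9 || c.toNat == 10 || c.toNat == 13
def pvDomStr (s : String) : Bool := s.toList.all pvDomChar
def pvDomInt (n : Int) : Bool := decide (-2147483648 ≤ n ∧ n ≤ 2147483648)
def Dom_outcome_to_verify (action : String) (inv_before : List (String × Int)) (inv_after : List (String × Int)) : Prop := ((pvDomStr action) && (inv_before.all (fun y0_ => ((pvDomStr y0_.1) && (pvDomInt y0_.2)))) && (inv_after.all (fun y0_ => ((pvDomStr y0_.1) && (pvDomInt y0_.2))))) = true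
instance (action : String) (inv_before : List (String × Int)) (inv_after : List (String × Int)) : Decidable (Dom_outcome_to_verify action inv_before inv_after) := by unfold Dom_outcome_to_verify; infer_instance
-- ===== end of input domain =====

-- B builds one signed delta map by subtract-merge (copy after, subtract before) instead of classifying a
-- set union into gains/losses dicts, and the 'do' branch selects the lexicographically smallest gained
-- non-survival key via min instead of the first hit of a scan (objective: alternative).

-- ===== PORT A =====
def outcome_to_verify (action : String) (inv_before : List (String × Int)) (inv_after : List (String × Int)) : Option String :=
  let survival : PySem.Set String := PySem.Set.ofList ["health", "food", "drink", "energy"]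
  let gl :=
    (PySem.Set.union (PySem.Set.ofList (inv_before.map Prod.fst)) (PySem.Set.ofList (inv_after.map Prod.fst))).foldl
      (fun (gl : PySem.Dict String Int × PySem.Dict String Int) k =>
        let d := (PySem.Dict.mk inv_after).getD k 0 - (PySem.Dict.mk inv_before).getD k 0
        if 0 < d then (gl.1.insert k d, gl.2)
        else if d < 0 then (gl.1, gl.2.insert k (-d))
        else gl)
      (PySem.Dict.empty, PySem.Dict.empty)
  if action = "do" then
    match gl.1.keys.find? (fun k => !(survival.contains k)) with
    | some k => some k
    | none =>
      if 0 < gl.1.getD "food" 0 then some "restore_food"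
      else if 0 < gl.1.getD "drink" 0 then some "restore_drink"
      else none
  else if PySem.Str.startswith action "place_" then
    if gl.2.size ≠ 0 then some (PySem.Str.replace action "place_" "") else none
  else if PySem.Str.startswith action "make_" then
    let crafted := PySem.Str.replace action "make_" ""
    if 0 < gl.1.getD crafted 0 then some crafted else none
  else none

-- ===== PORT B =====
def outcome_to_verify_alt (action : String) (inv_before : List (String × Int)) (inv_after : List (String × Int)) : Option String :=
  let delta : PySem.Dict String Int :=
    (PySem.Dict.mk inv_before).items.foldl
      (fun (d : PySem.Dict String Int) kv => d.insert kv.1 (d.getD kv.1 0 - kv.2))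
      (PySem.Dict.mk inv_after)
  if action = "do" then
    match PySem.List.min?
        ((delta.items.filter (fun kv =>
            decide (0 < kv.2) && !(["health", "food", "drink", "energy"].contains kv.1))).map Prod.fst)
        (fun x => x) with
    | some k => some k
    | none =>
      if 0 < delta.getD "food" 0 then some "restore_food"
      else if 0 < delta.getD "drink" 0 then some "restore_drink"
      else none
  else if PySem.Str.startswith action "place_" then
    if delta.values.any (fun d => decide (d < 0)) then some (PySem.Str.replace action "place_" "") else none
  else if PySem.Str.startswith action "make_" then
    let crafted := PySem.Str.replace action "make_" ""
    if 0 < delta.getD crafted 0 then some crafted else none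
  else none

-- ===== PRECONDITION & SPEC =====
-- Pre_ excludes (a) association lists with duplicate keys, which do not represent a Python dict, and
-- (b) action == "do" inputs on which TWO or more non-survival keys gained: there A returns whichever such
-- key Python's hash-seed-dependent set iteration happens to yield first, an accidental value no port can
-- reproduce; everywhere else A's value is order-independent and matched exactly.
def Pre_outcome_to_verify (action : String) (inv_before : List (String × Int)) (inv_after : List (String × Int)) : Prop :=
  (inv_before.map Prod.fst).Nodup ∧ (inv_after.map Prod.fst).Nodup ∧
  (action = "do" →
    ((inv_before.map Prod.fst ++ inv_after.map Prod.fst).dedup.filter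
      (fun k => decide (0 < (PySem.Dict.mk inv_after).getD k 0 - (PySem.Dict.mk inv_before).getD k 0)
                 && !(["health", "food", "drink", "energy"].contains k))).length ≤ 1)
instance (action : String) (inv_before : List (String × Int)) (inv_after : List (String × Int)) : Decidable (Pre_outcome_to_verify action inv_before inv_after) := by unfold Pre_outcome_to_verify; infer_instance

def pvWitness_outcome_to_verify : String × (List (String × Int)) × (List (String × Int)) :=
  ("do", [("wood", 1), ("food", 3)], [("wood", 2), ("food", 5)])

def Spec_outcome_to_verify (action : String) (inv_before : List (String × Int)) (inv_after : List (String × Int)) (out : Option String) : Prop := out = outcome_to_verify_alt action inv_before inv_after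
instance (action : String) (inv_before : List (String × Int)) (inv_after : List (String × Int)) (out : Option String) : Decidable (Spec_outcome_to_verify action inv_before inv_after out) := by unfold Spec_outcome_to_verify; infer_instance

-- ===== CLAIM (what is proved, stated in full; the proofs are below) =====
def Claim_equal_outcome_to_verify : Prop := ∀ (action : String) (inv_before : List (String × Int)) (inv_after : List (String × Int)), Dom_outcome_to_verify action inv_before inv_after → Pre_outcome_to_verify action inv_before inv_after → Spec_outcome_to_verify action inv_before inv_after (outcome_to_verify action inv_before inv_after)

-- ===== LEMMAS AND PROOFS =====

theorem pv_find?_eq_min? (l1 : List String) (p1 : String → Bool) (l2 : List String)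
    (h : ∀ x, (x ∈ l1 ∧ p1 x = true) ↔ x ∈ l2)
    (huniq : ∀ a b, a ∈ l2 → b ∈ l2 → a = b) :
    l1.find? p1 = PySem.List.min? l2 (fun x => x) := by
  cases h1 : l1.find? p1 with
  | none =>
    cases h2 : PySem.List.min? l2 (fun x => x) with
    | none => rfl
    | some m =>
      have hm := (h m).mpr (PySem.List.min?_mem h2)
      exact absurd hm.2 (by simpa using List.find?_eq_none.mp h1 _ hm.1)
  | some a =>
    have ha : a ∈ l2 := (h a).mp ⟨List.mem_of_find?_eq_some h1, List.find?_some h1⟩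
    cases h2 : PySem.List.min? l2 (fun x => x) with
    | none =>
      rw [PySem.List.min?_eq_none_iff] at h2
      rw [h2] at ha
      cases ha
    | some m =>
      exact congrArg some (huniq a m ha (PySem.List.min?_mem h2))

theorem pv_fold_split (diff : String → Int) (L : List String)
    (g l : PySem.Dict String Int) :
    L.foldl (fun (gl : PySem.Dict String Int × PySem.Dict String Int) k =>
        if 0 < diff k then (gl.1.insert k (diff k), gl.2)
        else if diff k < 0 then (gl.1, gl.2.insert k (-(diff k)))
        else gl) (g, l)
      = ((L.filter (fun k => decide (0 < diff k))).foldl (fun d k => d.insert k (diff k)) g,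
         (L.filter (fun k => decide (diff k < 0))).foldl (fun d k => d.insert k (-(diff k))) l) := by
  induction L generalizing g l with
  | nil => rfl
  | cons a L ih =>
    by_cases h1 : 0 < diff a
    · have h2 : ¬ diff a < 0 := by omega
      simp [h1, h2, ih]
    · by_cases h2 : diff a < 0
      · simp [h1, h2, ih]
      · simp [h1, h2, ih]

theorem pv_getD_fold (v : String → Int) (L : List String) (d : PySem.Dict String Int) (k : String) (d0 : Int) :
    (L.foldl (fun d k => d.insert k (v k)) d).getD k d0 = if k ∈ L then v k else d.getD k d0 := by
  induction L generalizing d with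
  | nil => simp
  | cons a L ih =>
    simp only [List.foldl_cons, ih, PySem.Dict.getD_insert, List.mem_cons]
    by_cases hL : k ∈ L <;> by_cases ha : k = a <;> simp [hL, ha]

theorem pv_len_le_one {α : Type} {l : List α} {a b : α} (h : l.length ≤ 1)
    (ha : a ∈ l) (hb : b ∈ l) : a = b := by
  match l with
  | [] => cases ha
  | [x] => simp_all
  | x :: y :: t => simp at h

-- the subtract-merge fold: getD of the result = the start's getD minus the (unique) value bound to k in l
theorem pv_fold_sub_getD (l : List (String × Int)) (hnd : (l.map Prod.fst).Nodup)
    (d : PySem.Dict String Int) (k : String) :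
    (l.foldl (fun (d : PySem.Dict String Int) kv => d.insert kv.1 (d.getD kv.1 0 - kv.2)) d).getD k 0
      = d.getD k 0 - (match l.find? (fun p => p.1 == k) with | some p => p.2 | none => 0) := by
  induction l generalizing d with
  | nil => simp
  | cons a t ih =>
    simp only [List.map_cons, List.nodup_cons] at hnd
    rw [List.foldl_cons, ih hnd.2]
    by_cases hk : a.1 = k
    · have hft : t.find? (fun p => p.1 == k) = none := by
        rw [List.find?_eq_none]
        intro p hp hpk
        exact hnd.1 (by simpa [← hk] using (List.mem_map.mpr ⟨p, hp, by simpa using hpk⟩ : k ∈ t.map Prod.fst))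
      simp [hk, hft]
    · simp [hk, PySem.Dict.getD_insert, Ne.symm hk]

-- assoc lookup in a dict's items IS getD (keys unique)
theorem pv_find_items_getD (B : PySem.Dict String Int) (hnd : B.keys.Nodup) (k : String) :
    (match B.items.find? (fun p => p.1 == k) with | some p => p.2 | none => 0) = B.getD k 0 := by
  cases hf : B.items.find? (fun p => p.1 == k) with
  | some p =>
    have hp : (p.1, p.2) ∈ B.items := by simpa using List.mem_of_find?_eq_some hf
    have hpk : p.1 = k := by simpa using List.find?_some hf
    have : B.getD p.1 0 = p.2 := PySem.Dict.getD_of_mem_items B hp hnd 0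
    rw [← hpk, this]
  | none =>
    have hnk : ¬ B.contains k := by
      rw [PySem.Dict.contains_eq_decide_mem_keys]
      simp only [decide_eq_true_eq, PySem.Dict.keys]
      intro hm
      rcases List.mem_map.mp hm with ⟨p, hp, hpk⟩
      exact absurd (by simpa using hpk) (by simpa using List.find?_eq_none.mp hf p hp)
    rw [PySem.Dict.getD_of_not_contains _ _ (by simpa using hnk)]

-- ===== VERDICT (by name: the statement is the Claim_ definition above) =====
theorem outcome_to_verify_spec : Claim_equal_outcome_to_verify := by
  intro action inv_before inv_after _hdom hpre
  unfold Spec_outcome_to_verify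
  unfold outcome_to_verify outcome_to_verify_alt
  rw [pv_fold_split (fun k => (PySem.Dict.mk inv_after).getD k 0 - (PySem.Dict.mk inv_before).getD k 0)]
  set A0 : PySem.Dict String Int := PySem.Dict.mk inv_after with hA0
  set B0 : PySem.Dict String Int := PySem.Dict.mk inv_before with hB0
  set diff : String → Int := fun k => A0.getD k 0 - B0.getD k 0 with hdiffdef
  set kb := inv_before.map Prod.fst with hkb
  set ka := inv_after.map Prod.fst with hka
  set U : List String := PySem.Set.union (PySem.Set.ofList kb) (PySem.Set.ofList ka) with hUdef
  set G : PySem.Dict String Int :=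
    (U.filter (fun k => decide (0 < diff k))).foldl (fun d k => d.insert k (diff k)) PySem.Dict.empty with hG
  set L2 : PySem.Dict String Int :=
    (U.filter (fun k => decide (diff k < 0))).foldl (fun d k => d.insert k (-(diff k))) PySem.Dict.empty with hL2
  set delta : PySem.Dict String Int :=
    B0.items.foldl (fun (d : PySem.Dict String Int) kv => d.insert kv.1 (d.getD kv.1 0 - kv.2)) A0 with hdelta
  -- basic facts
  obtain ⟨hpreB, hpreA, hpredo⟩ := hpre
  have hkeyAeq : A0.keys = ka := by rw [hA0, hka]; rfl
  have hkeyBeq : B0.keys = kb := by rw [hB0, hkb]; rfl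
  have hndA : A0.keys.Nodup := by rw [hkeyAeq, hka]; exact hpreA
  have hndB : B0.keys.Nodup := by rw [hkeyBeq, hkb]; exact hpreB
  have hdget : ∀ k : String, delta.getD k 0 = diff k := by
    intro k
    rw [hdelta, pv_fold_sub_getD B0.items (by rw [hB0]; exact hpreB) A0 k,
        pv_find_items_getD B0 hndB k]
  have hndD : delta.keys.Nodup := by
    rw [hdelta]
    exact PySem.Dict.nodup_keys_foldl_insert_key B0.items Prod.fst _ A0 hndA
  have hBitems : B0.items.map Prod.fst = kb := by rw [hB0, hkb]
  have hkeyD : ∀ x : String, x ∈ delta.keys ↔ x ∈ kb ∨ x ∈ ka := by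
    intro x
    rw [hdelta, PySem.Dict.keys_foldl_insert_key, PySem.Set.mem_update, hkeyAeq, hBitems]
    tauto
  have hU : ∀ x : String, x ∈ U ↔ x ∈ kb ∨ x ∈ ka := by
    intro x
    simp [hUdef, PySem.Set.mem_union, PySem.Set.mem_ofList]
  have hconA : ∀ x : String, A0.contains x = decide (x ∈ ka) := by
    intro x
    rw [PySem.Dict.contains_eq_decide_mem_keys, hkeyAeq]
  have hconB : ∀ x : String, B0.contains x = decide (x ∈ kb) := by
    intro x
    rw [PySem.Dict.contains_eq_decide_mem_keys, hkeyBeq]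
  have hmem : ∀ k : String, diff k ≠ 0 → k ∈ kb ∨ k ∈ ka := by
    intro k hk
    by_contra hc
    rw [not_or] at hc
    have h1 : A0.getD k 0 = 0 := by
      refine PySem.Dict.getD_of_not_contains _ _ ?_
      rw [hconA]; simp only [decide_eq_false_iff_not]; exact hc.2
    have h2 : B0.getD k 0 = 0 := by
      refine PySem.Dict.getD_of_not_contains _ _ ?_
      rw [hconB]; simp only [decide_eq_false_iff_not]; exact hc.1
    apply hk
    simp [hdiffdef, h1, h2]
  have hGkeys : G.keys = PySem.Set.ofList (U.filter (fun k => decide (0 < diff k))) := by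
    rw [hG, PySem.Dict.keys_foldl_insert (f := fun _ k => diff k), PySem.Dict.keys_empty]
    rfl
  have hGget : ∀ s : String, G.getD s 0 = if s ∈ U.filter (fun k => decide (0 < diff k)) then diff s else 0 := by
    intro s
    rw [hG, pv_getD_fold]
    simp [PySem.Dict.getD_empty]
  have hGpos : ∀ s : String, (0 < G.getD s 0) = (0 < diff s) := by
    intro s
    apply propext
    rw [hGget s]
    constructor
    · intro h
      split at h
      · exact h
      · omega
    · intro h
      have hs : s ∈ U.filter (fun k => decide (0 < diff k)) := by
        rw [List.mem_filter]
        exact ⟨(hU s).mpr (hmem s (by omega)), by simpa using h⟩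
      rw [if_pos hs]
      exact h
  -- membership in B's candidate list (filter-map over delta's items)
  have hLq : ∀ x : String,
      x ∈ ((delta.items.filter (fun kv =>
              decide (0 < kv.2) && !(["health", "food", "drink", "energy"].contains kv.1))).map Prod.fst)
        ↔ ((x ∈ kb ∨ x ∈ ka) ∧ 0 < diff x ∧ ¬ x ∈ (["health", "food", "drink", "energy"] : List String)) := by
    intro x
    constructor
    · intro hx
      rcases List.mem_map.mp hx with ⟨kv, hkv, hkvx⟩
      rcases List.mem_filter.mp hkv with ⟨hkvitems, hkvq⟩
      simp only [Bool.and_eq_true, decide_eq_true_eq, Bool.not_eq_eq_eq_not, Bool.not_true] at hkvq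
      have hval : delta.getD kv.1 0 = kv.2 :=
        PySem.Dict.getD_of_mem_items delta (by simpa using hkvitems) hndD 0
      subst hkvx
      refine ⟨(hkeyD kv.1).mp (PySem.Dict.mem_keys_of_mem_items delta hkvitems), ?_, ?_⟩
      · rw [← hdget kv.1, hval]; exact hkvq.1
      · simpa using hkvq.2
    · rintro ⟨hxm, hxd, hxs⟩
      have hxk : x ∈ delta.keys := (hkeyD x).mpr hxm
      have hitems : (x, delta.getD x 0) ∈ delta.items := by
        rw [PySem.Dict.items_eq_map_keys delta hndD 0]
        exact List.mem_map.mpr ⟨x, hxk, rfl⟩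
      refine List.mem_map.mpr ⟨(x, delta.getD x 0), List.mem_filter.mpr ⟨hitems, ?_⟩, rfl⟩
      simp only [Bool.and_eq_true, decide_eq_true_eq, Bool.not_eq_eq_eq_not, Bool.not_true]
      exact ⟨by rw [hdget x]; exact hxd, by simpa using hxs⟩
  by_cases hdo : action = "do"
  · subst hdo
    rw [if_pos rfl, if_pos rfl]
    have hlen := hpredo rfl
    have hinP : ∀ x : String, (x ∈ kb ∨ x ∈ ka) → 0 < diff x →
        ¬ x ∈ (["health", "food", "drink", "energy"] : List String) →
        x ∈ ((kb ++ ka).dedup.filter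
          (fun k => decide (0 < diff k) && !(["health", "food", "drink", "energy"].contains k))) := by
      intro x hxm hxd hxs
      rw [List.mem_filter]
      refine ⟨List.mem_dedup.mpr (List.mem_append.mpr hxm), ?_⟩
      simp only [Bool.and_eq_true, decide_eq_true_eq, Bool.not_eq_eq_eq_not, Bool.not_true]
      exact ⟨hxd, by simpa using hxs⟩
    have hfind : G.keys.find? (fun k => !((PySem.Set.ofList ["health", "food", "drink", "energy"]).contains k))
        = PySem.List.min?
            ((delta.items.filter (fun kv =>
                decide (0 < kv.2) && !(["health", "food", "drink", "energy"].contains kv.1))).map Prod.fst)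
            (fun x => x) := by
      apply pv_find?_eq_min?
      · intro x
        rw [hGkeys, hLq x]
        simp only [PySem.Set.mem_ofList, List.mem_filter, PySem.Set.contains,
          Bool.not_eq_eq_eq_not, Bool.not_true, decide_eq_true_eq]
        constructor
        · rintro ⟨⟨hxU, hxd⟩, hs⟩
          exact ⟨(hU x).mp hxU, by simpa using hxd, by simpa using hs⟩
        · rintro ⟨hxm, hxd, hs⟩
          exact ⟨⟨(hU x).mpr hxm, by simpa using hxd⟩, by simpa using hs⟩
      · intro a b ha hb
        rw [hLq a] at ha
        rw [hLq b] at hb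
        exact pv_len_le_one hlen (hinP a ha.1 ha.2.1 ha.2.2) (hinP b hb.1 hb.2.1 hb.2.2)
    rw [hfind]
    simp only [hGpos, hdget]
  · rw [if_neg hdo, if_neg hdo]
    by_cases hpl : PySem.Str.startswith action "place_" = true
    · rw [if_pos hpl, if_pos hpl]
      have hvals : (delta.values.any (fun d => decide (d < 0)) = true) ↔ ∃ x, x ∈ delta.keys ∧ diff x < 0 := by
        rw [PySem.Dict.values_eq_map_keys delta hndD 0, List.any_map, List.any_eq_true]
        constructor
        · rintro ⟨x, hx, hxd⟩
          exact ⟨x, hx, by simpa [hdget x] using hxd⟩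
        · rintro ⟨x, hx, hxd⟩
          exact ⟨x, hx, by simpa [hdget x] using hxd⟩
      have hsz : (L2.size ≠ 0) = (delta.values.any (fun d => decide (d < 0)) = true) := by
        apply propext
        have hkeysL2 : L2.keys = PySem.Set.ofList (U.filter (fun k => decide (diff k < 0))) := by
          rw [hL2, PySem.Dict.keys_foldl_insert (f := fun _ k => -(diff k)), PySem.Dict.keys_empty]
          rfl
        have hszk : L2.size = L2.keys.length := by
          simp [PySem.Dict.size, PySem.Dict.keys]
        rw [hszk, hkeysL2, hvals]
        constructor
        · intro h
          have hne : ¬ (PySem.Set.ofList (U.filter (fun k => decide (diff k < 0))) = []) := by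
            intro hnil
            exact h (by rw [hnil]; rfl)
          rw [List.eq_nil_iff_forall_not_mem] at hne
          simp only [not_forall, not_not] at hne
          rcases hne with ⟨x, hx⟩
          rw [PySem.Set.mem_ofList, List.mem_filter] at hx
          exact ⟨x, (hkeyD x).mpr ((hU x).mp hx.1), by simpa using hx.2⟩
        · rintro ⟨x, hxk, hxd⟩
          have hxU : x ∈ PySem.Set.ofList (U.filter (fun k => decide (diff k < 0))) := by
            rw [PySem.Set.mem_ofList, List.mem_filter]
            exact ⟨(hU x).mpr ((hkeyD x).mp hxk), by simpa using hxd⟩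
          intro hlen0
          rw [List.length_eq_zero_iff] at hlen0
          rw [hlen0] at hxU
          cases hxU
      simp only [hsz]
    · rw [if_neg hpl, if_neg hpl]
      by_cases hmk : PySem.Str.startswith action "make_" = true
      · rw [if_pos hmk, if_pos hmk]
        simp only [hGpos, hdget]
      · rw [if_neg hmk, if_neg hmk]
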